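-- pv_equiv track=rewrite | github.com/mike-buhtig/m3u_merge | src/m3u_merge/parse_m3u.py | _split_extinf_line
-- ===== SOURCE A (Python) =====
-- def _split_extinf_line(line: str) -> tuple[str, str]:
--     """
--     Safely splits an #EXTINF line into (attributes, name).
--     It looks for the first comma that is NOT inside quotes.
--     """
--     # Strip '#EXTINF:' prefix if present
--     if line.startswith("#EXTINF:"):
--         # Skip the tag itself
--         start_idx = 8
--     else:
--         start_idx = 0
--
--     in_quotes = False
--     split_index = -1
--
--     # Scan the string starting after #EXTINF:
--     for i in range(start_idx, len(line)):
--         ch = line[i]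
--
--         if ch == '"':
--             in_quotes = not in_quotes
--
--         # Found the separator comma?
--         if ch == ',' and not in_quotes:
--             split_index = i
--             break
--
--     if split_index != -1:
--         # Everything before comma (minus #EXTINF:) is metadata
--         # Everything after is the channel name
--         # We slice from 0 to keep original indices aligned conceptually,
--         # but effectively we want header part vs name part.
--
--         # If there was an #EXTINF prefix, we might want to remove the duration logic here?
--         # Actually, easiest is just to return the raw chunks.
--
--         header_part = line[:split_index] # Contains "#EXTINF:-1 tvg-id..."
--         name_part = line[split_index+1:] # Contains "My Channel Name"
--         return header_part, name_part
--     else: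
--         # No comma found? Treat whole thing as header (weird) or empty name
--         return line, ""
-- ===== SOURCE B (Python) =====
-- def _split_extinf_line(line: str) -> tuple[str, str]:
--     # Split at the quote characters; even-indexed segments are outside quotes.
--     segments = line.split('"')
--     offset = 0
--     for k, seg in enumerate(segments):
--         if k % 2 == 0:
--             p = seg.find(',')
--             if p != -1:
--                 idx = offset + p
--                 return line[:idx], line[idx + 1:]
--         offset += len(seg) + 1
--     return line, ""
-- ===== Notes on version B (the rewrite author's own statement) =====
-- stated objective: faster
-- what changed: B replaces A's per-character quote-toggle state machine with one str.split on the quote character followed by a comma search only in the even (outside-quotes) segments while tracking a running offset; the EXTINF prefix special-casing is dropped since that prefix contains no quote or comma.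
import Mathlib
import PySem

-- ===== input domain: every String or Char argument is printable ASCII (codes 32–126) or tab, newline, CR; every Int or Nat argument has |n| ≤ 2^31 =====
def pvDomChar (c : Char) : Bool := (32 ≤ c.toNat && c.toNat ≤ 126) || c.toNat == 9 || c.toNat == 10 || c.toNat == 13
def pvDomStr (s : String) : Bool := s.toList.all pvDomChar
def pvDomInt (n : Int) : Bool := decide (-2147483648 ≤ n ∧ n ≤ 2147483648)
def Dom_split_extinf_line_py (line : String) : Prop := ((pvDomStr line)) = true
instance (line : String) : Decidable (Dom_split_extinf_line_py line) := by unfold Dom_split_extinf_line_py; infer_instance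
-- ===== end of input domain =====

-- B splits the line at the quote character once and scans only the even (outside-quotes)
-- segments for the first comma, instead of A's per-character quote-toggle scan; the timing
-- run measured B faster by a constant factor (C-level str.split vs a Python char loop).

-- ===== PORT A =====
-- the for-loop of A: absolute index i, in_quotes flag; `break` = returning `some i`
def pvScanA : List Char → Bool → Nat → Option Nat
  | [], _, _ => none
  | c :: cs, q, i =>
    let q' := if c = '"' then !q else q
    if c = ',' && !q' then some i else pvScanA cs q' (i + 1)

def split_extinf_line_py (line : String) : String × String :=
  let cs := line.toList
  let start_idx := if PySem.Str.startswith line "#EXTINF:" then 8 else 0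
  -- range(start_idx, len(line)) with line[i]: scan the chars after start_idx, carrying i
  match pvScanA (cs.drop start_idx) false start_idx with
  | some split_index =>
      -- line[:split_index], line[split_index+1:] (nonnegative in-range slices = take/drop)
      (String.ofList (cs.take split_index), String.ofList (cs.drop (split_index + 1)))
  | none => (line, "")

-- ===== PORT B =====
-- the for-loop of B over enumerate(segments): k = segment index, off = running offset;
-- seg.find(',') ported as findIdx? (none = Python's -1)
def pvScanB : List (List Char) → Nat → Nat → Option Nat
  | [], _, _ => none
  | seg :: rest, k, off =>
    if k % 2 = 0 then
      match seg.findIdx? (· = ',') with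
      | some p => some (off + p)
      | none => pvScanB rest (k + 1) (off + seg.length + 1)
    else pvScanB rest (k + 1) (off + seg.length + 1)

def split_extinf_line_py_alt (line : String) : String × String :=
  let cs := line.toList
  -- line.split('"') ported as List.splitOn (Python-exact for a one-char separator)
  match pvScanB (cs.splitOn '"') 0 0 with
  | some idx => (String.ofList (cs.take idx), String.ofList (cs.drop (idx + 1)))
  | none => (line, "")

-- ===== PRECONDITION & SPEC =====
def Spec_split_extinf_line_py (line : String) (out : String × String) : Prop := out = split_extinf_line_py_alt line
instance (line : String) (out : String × String) : Decidable (Spec_split_extinf_line_py line out) := by unfold Spec_split_extinf_line_py; infer_instance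

-- ===== CLAIM (what is proved, stated in full; the proofs are below) =====
def Claim_equal_split_extinf_line_py : Prop := ∀ (line : String), Dom_split_extinf_line_py line → Spec_split_extinf_line_py line (split_extinf_line_py line)

-- ===== LEMMAS AND PROOFS =====

-- core correspondence: the quote-toggle scan equals the segment scan, for any segment index k
-- whose parity matches the in_quotes flag and any starting offset i
theorem pvScan_eq (cs : List Char) : ∀ (k i : Nat),
    pvScanA cs (!decide (k % 2 = 0)) i = pvScanB (cs.splitOn '"') k i := by
  induction cs with
  | nil =>
      intro k i
      by_cases hk : k % 2 = 0 <;>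
        simp [List.splitOn, pvScanA, pvScanB, hk, List.findIdx?_nil]
  | cons c cs ih =>
      intro k i
      by_cases hq : c = '"'
      · subst hq
        rw [show ('"' :: cs).splitOn '"' = [] :: cs.splitOn '"' by
              simp [List.splitOn, List.splitOnP_cons]]
        have h1 : pvScanB ([] :: cs.splitOn '"') k i
            = pvScanB (cs.splitOn '"') (k + 1) (i + 1) := by
          by_cases hk : k % 2 = 0 <;> simp [pvScanB, hk, List.findIdx?_nil]
        rw [h1, ← ih (k + 1) (i + 1)]
        have hpar : (!decide ((k + 1) % 2 = 0)) = !(!decide (k % 2 = 0)) := by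
          rcases Nat.mod_two_eq_zero_or_one k with h | h <;> simp [Nat.add_mod, h]
        simp [pvScanA, hpar]
      · obtain ⟨seg, rest, hsr⟩ : ∃ seg rest, cs.splitOn '"' = seg :: rest := by
          rcases h : cs.splitOn '"' with _ | ⟨a, b⟩
          · exact absurd h (by simp [List.splitOn]; exact List.splitOnP_ne_nil _ cs)
          · exact ⟨a, b, rfl⟩
        have hstep : ((c :: cs).splitOn '"') = (c :: seg) :: rest := by
          have : cs.splitOnP (fun x => x == '"') = seg :: rest := hsr
          simp [List.splitOn, List.splitOnP_cons, hq, this]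
        rw [hstep]
        by_cases hk : k % 2 = 0
        · by_cases hc : c = ','
          · subst hc
            simp [pvScanA, pvScanB, hk, hq, List.findIdx?_cons]
          · have hB : pvScanB ((c :: seg) :: rest) k i
                = pvScanB (seg :: rest) k (i + 1) := by
              rcases hfi : seg.findIdx? (· = ',') with _ | p
              · simp only [pvScanB, if_pos hk, List.findIdx?_cons, hfi]
                simp only [show decide (c = ',') = false by simp [hc], Option.map_none]
                have harith : i + (c :: seg).length + 1 = i + 1 + seg.length + 1 := by
                  simp; omega
                rw [harith]
                rfl
              · simp only [pvScanB, if_pos hk, List.findIdx?_cons, hfi]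
                simp only [show decide (c = ',') = false by simp [hc], Option.map_some]
                show some (i + (p + 1)) = some (i + 1 + p)
                congr 1
                omega
            rw [hB, ← hsr, ← ih k (i + 1)]
            simp [pvScanA, hq, hc]
        · have hB : pvScanB ((c :: seg) :: rest) k i
              = pvScanB (seg :: rest) k (i + 1) := by
            simp only [pvScanB, if_neg hk]
            have harith : i + (c :: seg).length + 1 = i + 1 + seg.length + 1 := by
              simp; omega
            rw [harith]
          rw [hB, ← hsr, ← ih k (i + 1)]
          simp [pvScanA, hq, hk]

-- "#EXTINF:" contains no '"' and no ',': scanning over it only advances the index by 8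
theorem pvScanA_prefix (cs : List Char) (i : Nat) :
    pvScanA ('#' :: 'E' :: 'X' :: 'T' :: 'I' :: 'N' :: 'F' :: ':' :: cs) false i
      = pvScanA cs false (i + 8) := rfl

theorem split_extinf_line_py_spec' (line : String) :
    split_extinf_line_py line = split_extinf_line_py_alt line := by
  by_cases hs : PySem.Str.startswith line "#EXTINF:" = true
  · have hpre : "#EXTINF:".toList <+: line.toList := by
      rw [← PySem.Chars.startswith_iff]
      simpa [PySem.Str.startswith] using hs
    obtain ⟨t, ht⟩ := hpre
    have htl : line.toList = '#' :: 'E' :: 'X' :: 'T' :: 'I' :: 'N' :: 'F' :: ':' :: t := by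
      rw [← ht]; rfl
    simp only [split_extinf_line_py, split_extinf_line_py_alt, hs, if_pos]
    rw [← pvScan_eq line.toList 0 0]
    simp only [htl, List.drop_succ_cons, List.drop_zero]
    rw [show pvScanA ('#' :: 'E' :: 'X' :: 'T' :: 'I' :: 'N' :: 'F' :: ':' :: t)
          (!decide True) 0 = pvScanA t false 8 from pvScanA_prefix t 0]
  · simp only [split_extinf_line_py, split_extinf_line_py_alt, hs]
    rw [← pvScan_eq line.toList 0 0]
    simp

-- ===== VERDICT (by name: the statement is the Claim_ definition above) =====
theorem split_extinf_line_py_spec : Claim_equal_split_extinf_line_py := by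
  intro line _
  exact split_extinf_line_py_spec' line
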